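-- pv_equiv track=rewrite | github.com/Nithi67160346/model_Furniture_ColorMixed | Model_Brickit_Real_brick/Model_Table_Real_Brick.py | get_leg_tiling
-- ===== SOURCE A (Python) =====
-- def get_leg_tiling(length, is_bottom=False):
--     res, rem = [], length
--     if is_bottom and rem >= 2:
--         res.append(2)
--         rem -= 2
--     while rem >= 4:
--         res.append(4)
--         rem -= 4
--     while rem >= 2:
--         res.append(2)
--         rem -= 2
--     return res
-- ===== SOURCE B (Python) =====
-- def get_leg_tiling(length, is_bottom=False):
--     res = []
--     rem = length
--     if is_bottom and rem >= 2:
--         res.append(2)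
--         rem -= 2
--     if rem >= 2:
--         res += [4] * (rem // 4)
--         if rem % 4 >= 2:
--             res.append(2)
--     return res
-- ===== Notes on version B (the rewrite author's own statement) =====
-- stated objective: faster
-- what changed: Replaces the two subtract-and-append while-loops by a closed-form construction: [4]*(rem//4) plus one trailing [2] when rem%4>=2.
import Mathlib
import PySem

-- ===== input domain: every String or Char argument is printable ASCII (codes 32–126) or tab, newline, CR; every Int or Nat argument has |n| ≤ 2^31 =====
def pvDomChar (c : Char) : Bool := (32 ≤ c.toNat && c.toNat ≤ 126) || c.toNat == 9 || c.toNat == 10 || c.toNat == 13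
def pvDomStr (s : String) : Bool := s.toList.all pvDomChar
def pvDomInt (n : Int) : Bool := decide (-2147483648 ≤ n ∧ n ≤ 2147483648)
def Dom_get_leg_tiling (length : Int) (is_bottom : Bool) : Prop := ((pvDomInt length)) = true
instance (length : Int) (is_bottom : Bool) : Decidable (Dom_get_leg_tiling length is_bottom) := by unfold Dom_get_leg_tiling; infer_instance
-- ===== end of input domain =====

-- B replaces A's two subtract-and-append while-loops by a closed-form construction
-- ([4] repeated rem//4 times plus at most one trailing [2]); proven equal on all inputs.

-- ===== PORT A =====
-- A's second while loop: append 2 while rem >= 2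
def pvLoop2 (rem : Int) : List Int :=
  if 2 ≤ rem then 2 :: pvLoop2 (rem - 2) else []
termination_by rem.toNat
decreasing_by omega

-- A's first while loop: append 4 while rem >= 4, then fall through to the 2-loop
def pvLoop4 (rem : Int) : List Int :=
  if 4 ≤ rem then 4 :: pvLoop4 (rem - 4) else pvLoop2 rem
termination_by rem.toNat
decreasing_by omega

def get_leg_tiling (length : Int) (is_bottom : Bool) : List Int :=
  if is_bottom && decide (2 ≤ length) then 2 :: pvLoop4 (length - 2) else pvLoop4 length

-- ===== PORT B =====
def get_leg_tiling_alt (length : Int) (is_bottom : Bool) : List Int :=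
  let p : List Int × Int :=
    if is_bottom && decide (2 ≤ length) then ([2], length - 2) else ([], length)
  if 2 ≤ p.2 then
    p.1 ++ List.replicate (PySem.Int.floordiv p.2 4).toNat 4
        ++ (if 2 ≤ PySem.Int.mod p.2 4 then [2] else [])
  else p.1

-- ===== PRECONDITION & SPEC =====
def Spec_get_leg_tiling (length : Int) (is_bottom : Bool) (out : List Int) : Prop := out = get_leg_tiling_alt length is_bottom
instance (length : Int) (is_bottom : Bool) (out : List Int) : Decidable (Spec_get_leg_tiling length is_bottom out) := by unfold Spec_get_leg_tiling; infer_instance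

-- ===== CLAIM (what is proved, stated in full; the proofs are below) =====
def Claim_equal_get_leg_tiling : Prop := ∀ (length : Int) (is_bottom : Bool), Dom_get_leg_tiling length is_bottom → Spec_get_leg_tiling length is_bottom (get_leg_tiling length is_bottom)

-- ===== LEMMAS AND PROOFS =====

theorem pvLoop2_small (rem : Int) (h : rem < 4) :
    pvLoop2 rem = if 2 ≤ rem then [2] else [] := by
  rw [pvLoop2]
  split_ifs with h2
  · rw [pvLoop2]
    rw [if_neg (by omega)]
  · rfl

theorem pvLoop4_closed (rem : Int) :
    pvLoop4 rem =
      if 2 ≤ rem then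
        List.replicate (PySem.Int.floordiv rem 4).toNat 4
          ++ (if 2 ≤ PySem.Int.mod rem 4 then [2] else [])
      else [] := by
  rw [pvLoop4]
  rw [PySem.Int.floordiv_eq_ediv_of_pos (by norm_num : (0:Int) < 4),
      PySem.Int.mod_eq_emod_of_pos (by norm_num : (0:Int) < 4)]
  by_cases h4 : 4 ≤ rem
  · rw [if_pos h4, if_pos (by omega)]
    have ih := pvLoop4_closed (rem - 4)
    rw [PySem.Int.floordiv_eq_ediv_of_pos (by norm_num : (0:Int) < 4),
        PySem.Int.mod_eq_emod_of_pos (by norm_num : (0:Int) < 4)] at ih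
    rw [ih]
    by_cases h2' : 2 ≤ rem - 4
    · rw [if_pos h2']
      have e1 : (rem/4).toNat = ((rem-4)/4).toNat + 1 := by omega
      have e2 : rem % 4 = (rem-4) % 4 := by omega
      rw [e1, e2, List.replicate_succ]
      simp
    · rw [if_neg h2']
      have e1 : (rem/4).toNat = 1 := by omega
      have e2 : ¬ (2 ≤ rem % 4) := by omega
      rw [e1, if_neg e2]
      simp
  · rw [if_neg h4, pvLoop2_small rem (by omega)]
    by_cases h2 : 2 ≤ rem
    · have hd : (rem / 4).toNat = 0 := by omega
      have hm : rem % 4 = rem := by omega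
      rw [if_pos h2, if_pos h2, hd, hm, if_pos h2]
      simp
    · rw [if_neg h2, if_neg h2]
termination_by rem.toNat
decreasing_by omega

-- ===== VERDICT (by name: the statement is the Claim_ definition above) =====
theorem get_leg_tiling_spec : Claim_equal_get_leg_tiling := by
  intro length is_bottom _
  unfold Spec_get_leg_tiling get_leg_tiling get_leg_tiling_alt
  by_cases hb : is_bottom && decide (2 ≤ length)
  · simp only [hb, if_true, pvLoop4_closed]
    split_ifs <;> simp
  · simp only [hb, if_false, Bool.false_eq_true, pvLoop4_closed]
    split_ifs <;> simp
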